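-- pv_equiv track=rewrite | github.com/kohak-algorithm-study/weekly-algorithm | kirby/this-is-coding-test/20240715_10_1.py | solution
-- ===== SOURCE A (Python) =====
-- def solution(n: int, calculations: list) -> list:
--     answer = []
--     parent = []
--
--     def find_parent(a: int, parent: list) -> int:
--         if a != parent[a]:
--             parent[a] = find_parent(parent[a], parent)
--         return parent[a]
--
--     def union_node(a: int, b: int, parent: list):
--         a_parent = find_parent(a, parent)
--         b_parent = find_parent(b, parent)
--         if a_parent > b_parent:
--             parent[a_parent] = b_parent
--         else:
--             parent[b_parent] = a_parent
--
--     for i in range(n+1):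
--         parent.append(i)
--
--     for calc in calculations:
--         if calc[0] == 0:
--             union_node(calc[1], calc[2], parent)
--         else:
--             if find_parent(calc[1], parent) == find_parent(calc[2], parent):
--                 answer.append("YES")
--             else:
--                 answer.append("NO")
--
--     return answer
-- ===== SOURCE B (Python) =====
-- def solution(n: int, calculations: list) -> list:
--     # quick-find: comp[i] is the label of i's component; union relabels, query compares labels
--     comp = list(range(n + 1))
--     answer = []
--     for calc in calculations:
--         ra, rb = comp[calc[1]], comp[calc[2]]
--         if calc[0] == 0:
--             if ra != rb:
--                 hi, lo = (ra, rb) if ra > rb else (rb, ra)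
--                 comp = [lo if c == hi else c for c in comp]
--         else:
--             answer.append("YES" if ra == rb else "NO")
--     return answer
-- ===== Notes on version B (the rewrite author's own statement) =====
-- stated objective: alternative
-- what changed: A's union-find (parent-pointer forest with recursive path-compressing find_parent) is replaced by quick-find: a flat component-label array where a query just compares two labels and a union relabels the whole losing component to the smaller root label, so there is no find routine, no recursion and no pointer chasing at all.
import Mathlib
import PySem

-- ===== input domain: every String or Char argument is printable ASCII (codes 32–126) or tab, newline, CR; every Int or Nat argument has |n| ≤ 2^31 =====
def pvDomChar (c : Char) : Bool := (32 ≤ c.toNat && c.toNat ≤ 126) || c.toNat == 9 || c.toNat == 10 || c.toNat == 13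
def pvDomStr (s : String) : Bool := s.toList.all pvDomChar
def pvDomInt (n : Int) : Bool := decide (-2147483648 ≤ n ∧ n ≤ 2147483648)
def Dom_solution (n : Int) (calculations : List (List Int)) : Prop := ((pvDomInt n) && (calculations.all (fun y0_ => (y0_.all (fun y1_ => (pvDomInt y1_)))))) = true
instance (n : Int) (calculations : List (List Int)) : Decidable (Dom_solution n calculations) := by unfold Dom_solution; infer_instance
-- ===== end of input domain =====

-- B replaces A's union-find (parent-pointer forest with recursive path-compressing
-- find_parent) by quick-find: a flat component-label array; a query compares two
-- labels, a union relabels the losing component to the smaller root label.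
-- Objective: alternative (a genuinely different data structure, not faster).
-- A mutates no caller-visible argument; the equivalence is about the return value.

-- ===== PORT A =====
-- find_parent(a, parent): recursion ported with fuel (len+1 suffices on Pre_ inputs);
-- the mutable `parent` list is threaded through as state; none = IndexError/no return.
def findA : Nat → Int → List Int → Option (Int × List Int)
  | 0, _, _ => none
  | f+1, a, par =>
    match PySem.List.pyGet? par a with
    | none => none
    | some pa =>
      if a ≠ pa then
        match findA f pa par with
        | none => none
        | some (r, p) =>
          match PySem.List.pySet? p a r with
          | none => none
          | some p' =>
            match PySem.List.pyGet? p' a with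
            | none => none
            | some rv => some (rv, p')
      else some (pa, par)

def unionA (a b : Int) (par : List Int) : Option (List Int) :=
  match findA (par.length+1) a par with
  | none => none
  | some (ra, p1) =>
    match findA (p1.length+1) b p1 with
    | none => none
    | some (rb, p2) =>
      if ra > rb then PySem.List.pySet? p2 ra rb else PySem.List.pySet? p2 rb ra

def stepA (st : Option (List String × List Int)) (cal : List Int) : Option (List String × List Int) :=
  match st with
  | none => none
  | some (ans, par) =>
    match PySem.List.pyGet? cal 0 with
    | none => none
    | some c0 =>
      if c0 = 0 then
        match PySem.List.pyGet? cal 1, PySem.List.pyGet? cal 2 with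
        | some c1, some c2 => (unionA c1 c2 par).map (fun p => (ans, p))
        | _, _ => none
      else
        match PySem.List.pyGet? cal 1, PySem.List.pyGet? cal 2 with
        | some c1, some c2 =>
          match findA (par.length+1) c1 par with
          | none => none
          | some (ra, p1) =>
            match findA (p1.length+1) c2 p1 with
            | none => none
            | some (rb, p2) =>
              some (if ra = rb then ans ++ ["YES"] else ans ++ ["NO"], p2)
        | _, _ => none

def solution (n : Int) (calculations : List (List Int)) : List String :=
  let parent := (PySem.List.pyRange 0 (n+1) 1).foldl (fun p i => p ++ [i]) []
  ((calculations.foldl stepA (some ([], parent))).map Prod.fst).getD []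

-- ===== PORT B =====
-- quick-find step: ra, rb are the two component labels read from comp; a union
-- relabels every entry equal to the larger label to the smaller one (list
-- comprehension → List.map); a query compares the two labels.
def stepB (st : Option (List String × List Int)) (cal : List Int) : Option (List String × List Int) :=
  match st with
  | none => none
  | some (ans, comp) =>
    match PySem.List.pyGet? cal 1, PySem.List.pyGet? cal 2 with
    | some i1, some i2 =>
      match PySem.List.pyGet? comp i1, PySem.List.pyGet? comp i2 with
      | some ra, some rb =>
        match PySem.List.pyGet? cal 0 with
        | none => none
        | some c0 =>
          if c0 = 0 then
            if ra ≠ rb then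
              let hl := if ra > rb then (ra, rb) else (rb, ra)
              some (ans, comp.map (fun c => if c = hl.1 then hl.2 else c))
            else some (ans, comp)
          else some (ans ++ [if ra = rb then "YES" else "NO"], comp)
      | _, _ => none
    | _, _ => none

def solution_alt (n : Int) (calculations : List (List Int)) : List String :=
  ((calculations.foldl stepB (some ([], PySem.List.pyRange 0 (n+1) 1))).map Prod.fst).getD []

-- ===== PRECONDITION & SPEC =====
-- Pre_ is exactly where A returns: every operation has at least an op code and two
-- node ids, and both ids are valid Python indices into parent = list(range(n+1)),
-- i.e. -(n+1) <= id <= n (Python list indexing accepts negative ids); anything else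
-- raises IndexError in A (and in B).
def calcOK (n : Int) (c : List Int) : Bool :=
  match c with
  | _ :: c1 :: c2 :: _ => decide (-(n+1) ≤ c1 ∧ c1 ≤ n ∧ -(n+1) ≤ c2 ∧ c2 ≤ n)
  | _ => false

def Pre_solution (n : Int) (calculations : List (List Int)) : Prop :=
  ∀ c ∈ calculations, calcOK n c = true
instance (n : Int) (calculations : List (List Int)) : Decidable (Pre_solution n calculations) := by
  unfold Pre_solution; infer_instance

def pvWitness_solution : Int × List (List Int) := (2, [[0, 1, 2], [1, 1, 2], [1, 0, 2]])

def Spec_solution (n : Int) (calculations : List (List Int)) (out : List String) : Prop := out = solution_alt n calculations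
instance (n : Int) (calculations : List (List Int)) (out : List String) : Decidable (Spec_solution n calculations out) := by unfold Spec_solution; infer_instance

-- ===== CLAIM (what is proved, stated in full; the proofs are below) =====
def Claim_equal_solution : Prop := ∀ (n : Int) (calculations : List (List Int)), Dom_solution n calculations → Pre_solution n calculations → Spec_solution n calculations (solution n calculations)

-- ===== LEMMAS AND PROOFS =====

-- the Nat index Python's xs[a] addresses, for a valid (possibly negative) a
def nidx (len : Nat) (a : Int) : Nat := (if 0 ≤ a then a else a + len).toNat

-- termination measure of find's parent chain from a
def mu (len : Nat) (a : Int) : Nat := if 0 ≤ a then a.toNat else nidx len a + 1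

-- the invariant: every parent pointer is a nonneg int no larger than its index
def GoodP (par : List Int) : Prop :=
  ∀ i : Nat, (h : i < par.length) → 0 ≤ par[i] ∧ par[i] ≤ (i : Int)

-- canonical root of slot i in A's forest (fuel i+1 suffices under GoodP)
def rootN : Nat → List Int → Nat → Nat
  | 0, _, i => i
  | f+1, par, i =>
    if h : i < par.length then
      if par[i] = (i : Int) then i else rootN f par (par[i]).toNat
    else i

def Root (par : List Int) (i : Nat) : Nat := rootN (i+1) par i

lemma nidx_lt_of_valid (len : Nat) (a : Int) (h1 : -(len : Int) ≤ a) (h2 : a < (len : Int)) :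
    nidx len a < len := by unfold nidx; split <;> omega

lemma nidx_cast (len : Nat) (a : Int) (h1 : -(len : Int) ≤ a) (_h2 : a < (len : Int)) :
    (nidx len a : Int) = if 0 ≤ a then a else a + len := by
  unfold nidx; split <;> omega

lemma pyIdx?_eq_nidx (len : Nat) (a : Int) (h1 : -(len : Int) ≤ a) (h2 : a < (len : Int)) :
    PySem.List.pyIdx? len a = some (nidx len a) := by
  unfold PySem.List.pyIdx? nidx
  split_ifs <;> first | rfl | omega | (congr 1; omega)

lemma nidx_nonneg (len : Nat) (a : Int) (h : 0 ≤ a) : nidx len a = a.toNat := by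
  simp [nidx, h]

lemma pyGet?_valid (par : List Int) (a : Int)
    (h1 : -(par.length : Int) ≤ a) (h2 : a < (par.length : Int)) :
    PySem.List.pyGet? par a = some (par[nidx par.length a]'(nidx_lt_of_valid _ _ h1 h2)) := by
  unfold PySem.List.pyGet?
  rw [pyIdx?_eq_nidx _ _ h1 h2]
  simp [List.getElem?_eq_getElem (nidx_lt_of_valid _ _ h1 h2)]

lemma pySet?_valid (par : List Int) (a v : Int)
    (h1 : -(par.length : Int) ≤ a) (h2 : a < (par.length : Int)) :
    PySem.List.pySet? par a v = some (par.set (nidx par.length a) v) := by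
  unfold PySem.List.pySet?
  rw [pyIdx?_eq_nidx _ _ h1 h2]; rfl

-- fuel irrelevance of rootN above the slot index, under GoodP
lemma rootN_stable : ∀ (i : Nat) (par : List Int), GoodP par → i < par.length →
    ∀ f g : Nat, i < f → i < g → rootN f par i = rootN g par i := by
  intro i
  induction i using Nat.strong_induction_on with
  | _ i ih =>
    intro par hG hi f g hf hg
    match f, g with
    | f+1, g+1 =>
      simp only [rootN, dif_pos hi]
      by_cases hfix : par[i] = (i : Int)
      · simp [hfix]
      · rw [if_neg hfix, if_neg hfix]
        have hb := hG i hi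
        have hlt : (par[i]).toNat < i := by omega
        exact ih _ hlt par hG (by omega) f g (by omega) (by omega)

lemma Root_fix (par : List Int) (i : Nat) (hi : i < par.length) (h : par[i] = (i : Int)) :
    Root par i = i := by
  simp [Root, rootN, dif_pos hi, h]

lemma Root_step (par : List Int) (i : Nat) (hG : GoodP par) (hi : i < par.length)
    (h : par[i] ≠ (i : Int)) : Root par i = Root par (par[i]).toNat := by
  have hb := hG i hi
  have hlt : (par[i]).toNat < i := by omega
  simp only [Root, rootN, dif_pos hi, if_neg h]
  exact rootN_stable (par[i]).toNat par hG (by omega) i ((par[i]).toNat + 1)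
    (by omega) (by omega)

lemma Root_le : ∀ (i : Nat) (par : List Int), GoodP par → Root par i ≤ i := by
  intro i
  induction i using Nat.strong_induction_on with
  | _ i ih =>
    intro par hG
    by_cases hi : i < par.length
    · by_cases hfix : par[i] = (i : Int)
      · rw [Root_fix par i hi hfix]
      · have hb := hG i hi
        have hlt : (par[i]).toNat < i := by omega
        rw [Root_step par i hG hi hfix]
        have := ih _ hlt par hG
        omega
    · simp [Root, rootN, dif_neg hi]

lemma getElem_of_get? (par : List Int) (i : Nat) (v : Int) (hi : i < par.length)
    (h : par[i]? = some v) : par[i] = v := by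
  rw [List.getElem?_eq_getElem hi] at h; exact Option.some.inj h

lemma Root_isRoot : ∀ (i : Nat) (par : List Int), GoodP par → i < par.length →
    Root par i < par.length ∧ par[Root par i]? = some (Root par i : Int) := by
  intro i
  induction i using Nat.strong_induction_on with
  | _ i ih =>
    intro par hG hi
    by_cases hfix : par[i] = (i : Int)
    · rw [Root_fix par i hi hfix]
      exact ⟨hi, by rw [List.getElem?_eq_getElem hi, hfix]⟩
    · have hb := hG i hi
      have hlt : (par[i]).toNat < i := by omega
      rw [Root_step par i hG hi hfix]
      exact ih _ hlt par hG (by omega)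

lemma Root_fix_iff (par : List Int) (i : Nat) (hG : GoodP par) (hi : i < par.length) :
    Root par i = i ↔ par[i] = (i : Int) := by
  constructor
  · intro h
    by_contra hfix
    have hb := hG i hi
    have hlt : (par[i]).toNat < i := by omega
    have := Root_step par i hG hi hfix
    have := Root_le (par[i]).toNat par hG
    omega
  · exact Root_fix par i hi

lemma GoodP_set (p : List Int) (w : Nat) (v : Int) (hG : GoodP p) (h0 : 0 ≤ v)
    (hvw : v ≤ (w : Int)) : GoodP (p.set w v) := by
  intro i hip
  by_cases hii : i = w
  · subst hii
    rw [List.getElem_set_self]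
    exact ⟨h0, hvw⟩
  · rw [List.getElem_set_ne (by omega)]
    exact hG i (by simpa using hip)

-- writing a slot's own root into it does not change any root (path compression)
lemma Root_set_own : ∀ (j : Nat) (par : List Int) (w : Nat), GoodP par → w < par.length →
    j < par.length → Root (par.set w (Root par w : Int)) j = Root par j := by
  intro j
  induction j using Nat.strong_induction_on with
  | _ j ih =>
    intro par w hG hw hj
    have hrw := Root_isRoot w par hG hw
    have hrle := Root_le w par hG
    by_cases hjw : j = w
    · subst hjw
      by_cases hfix : Root par j = j
      · have hpj : par[j] = (j : Int) := (Root_fix_iff par j hG hj).mp hfix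
        rw [hfix]
        have : par.set j (j : Int) = par := by
          apply List.ext_getElem (by simp)
          intro k hk1 hk2
          by_cases hkj : k = j
          · subst hkj; simpa [List.getElem_set_self] using hpj.symm
          · rw [List.getElem_set_ne (by omega)]
        rw [this, hfix]
      · have hrlt : Root par j < j := by omega
        have hset : (par.set j (Root par j : Int))[j]'(by simpa using hj) = (Root par j : Int) := by
          simp [List.getElem_set_self]
        have hne : (par.set j (Root par j : Int))[j]'(by simpa using hj) ≠ (j : Int) := by
          rw [hset]; omega
        rw [Root_step _ j (GoodP_set par j _ hG (by omega) (by omega)) (by simpa using hj) hne]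
        rw [hset]
        have htn : ((Root par j : Int)).toNat = Root par j := by omega
        rw [htn]
        -- Root par j is a root, and its slot is untouched (Root par j ≠ j)
        have hslot : (par.set j (Root par j : Int))[Root par j]'(by simpa using hrw.1)
            = (Root par j : Int) := by
          rw [List.getElem_set_ne (by omega)]
          exact getElem_of_get? par _ _ hrw.1 hrw.2
        exact Root_fix _ _ (by simpa using hrw.1) hslot
    · -- j ≠ w: walk one step, untouched slot
      have hslot : (par.set w (Root par w : Int))[j]'(by simpa using hj) = par[j] := by
        rw [List.getElem_set_ne (by omega)]
      by_cases hfix : par[j] = (j : Int)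
      · rw [Root_fix _ j (by simpa using hj) (by rw [hslot]; exact hfix), Root_fix par j hj hfix]
      · have hb := hG j hj
        have hlt : (par[j]).toNat < j := by omega
        rw [Root_step _ j (GoodP_set par w _ hG (by omega) (by omega)) (by simpa using hj)
          (by rw [hslot]; exact hfix)]
        rw [hslot]
        rw [Root_step par j hG hj hfix]
        exact ih _ hlt par w hG hw (by omega)

-- union write: pointing root m at root q ≤ m relabels exactly the class of m to q
lemma Root_set_union : ∀ (j : Nat) (par : List Int) (m q : Nat), GoodP par →
    m < par.length → q < par.length →
    par[m]? = some (m : Int) → par[q]? = some (q : Int) → q ≤ m → j < par.length →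
    Root (par.set m (q : Int)) j = if Root par j = m then q else Root par j := by
  intro j
  induction j using Nat.strong_induction_on with
  | _ j ih =>
    intro par m q hG hm hq hpm' hpq' hqm hj
    have hpm : par[m]'hm = (m : Int) := getElem_of_get? par m _ hm hpm'
    have hpq : par[q]'hq = (q : Int) := getElem_of_get? par q _ hq hpq'
    by_cases hjm : j = m
    · rw [hjm]
      have hRj : Root par m = m := Root_fix par m hm hpm
      rw [if_pos hRj]
      by_cases hqj : q = m
      · rw [hqj]
        have hself : par.set m ((m : Nat) : Int) = par := by
          apply List.ext_getElem (by simp)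
          intro k hk1 hk2
          by_cases hkj : k = m
          · subst hkj; simpa [List.getElem_set_self] using hpm.symm
          · rw [List.getElem_set_ne (by omega)]
        rw [hself, hRj]
      · have hset : (par.set m (q : Int))[m]'(by simpa using hm) = (q : Int) := by
          simp [List.getElem_set_self]
        have hGs : GoodP (par.set m (q : Int)) := GoodP_set par m _ hG (by omega) (by omega)
        have hne : (par.set m (q : Int))[m]'(by simpa using hm) ≠ (m : Int) := by
          rw [hset]; omega
        rw [Root_step _ m hGs (by simpa using hm) hne, hset]
        have htn : ((q : Int)).toNat = q := by omega
        rw [htn]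
        have hslot : (par.set m (q : Int))[q]'(by simpa using hq) = (q : Int) := by
          rw [List.getElem_set_ne (by omega)]; exact hpq
        exact Root_fix _ _ (by simpa using hq) hslot
    · have hslot : (par.set m (q : Int))[j]'(by simpa using hj) = par[j] := by
        rw [List.getElem_set_ne (by omega)]
      have hGs : GoodP (par.set m (q : Int)) := GoodP_set par m _ hG (by omega) (by omega)
      by_cases hfix : par[j] = (j : Int)
      · have hRj : Root par j = j := Root_fix par j hj hfix
        rw [Root_fix _ j (by simpa using hj) (by rw [hslot]; exact hfix), hRj, if_neg (by omega)]
      · have hb := hG j hj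
        have hlt : (par[j]).toNat < j := by omega
        rw [Root_step _ j hGs (by simpa using hj) (by rw [hslot]; exact hfix), hslot]
        rw [Root_step par j hG hj hfix]
        exact ih _ hlt par m q hG hm hq hpm' hpq' hqm (by omega)

-- A's find_parent returns the canonical root and preserves every root
lemma findA_root : ∀ (k : Nat) (f : Nat) (a : Int) (par : List Int), GoodP par →
    -(par.length : Int) ≤ a → a < (par.length : Int) →
    mu par.length a < f → mu par.length a ≤ k →
    ∃ p', findA f a par = some ((Root par (nidx par.length a) : Int), p') ∧
      p'.length = par.length ∧ GoodP p' ∧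
      ∀ j : Nat, j < par.length → Root p' j = Root par j := by
  intro k
  induction k using Nat.strong_induction_on with
  | _ k ih =>
    intro f a par hG h1 h2 hf hk
    match f with
    | 0 => omega
    | f+1 =>
      have hvn := nidx_lt_of_valid par.length a h1 h2
      have hread := pyGet?_valid par a h1 h2
      have hpab := hG (nidx par.length a) hvn
      have hcast := nidx_cast par.length a h1 h2
      simp only [findA, hread]
      set s := nidx par.length a with hs
      by_cases hap : a = par[s]'hvn
      · rw [if_neg (not_ne_iff.mpr hap)]
        -- a = par[s] forces 0 ≤ a, hence (s : Int) = a = par[s], a fixpoint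
        have h0a : 0 ≤ a := by rw [hap]; exact hpab.1
        have hsa : (s : Int) = a := by rw [hcast, if_pos h0a]
        have hfix : par[s]'hvn = (s : Int) := by omega
        rw [Root_fix par s hvn hfix]
        refine ⟨par, ?_, rfl, hG, fun _ _ => rfl⟩
        rw [hfix]
      · rw [if_pos hap]
        have h0pa : 0 ≤ par[s]'hvn := hpab.1
        have hpale : par[s]'hvn ≤ (s : Int) := hpab.2
        have hmupa : mu par.length (par[s]'hvn) = (par[s]'hvn).toNat := by
          simp [mu, h0pa]
        have hlt : mu par.length (par[s]'hvn) < mu par.length a := by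
          rw [hmupa]; unfold mu; split_ifs with h0a
          · rw [if_pos h0a] at hcast
            have := hpab.2; omega
          · have := hpab.2; omega
        obtain ⟨p, hfind, hplen, hGp, hRp⟩ :=
          ih (mu par.length (par[s]'hvn)) (by omega) f (par[s]'hvn) par hG
            (by omega) (by omega) (by omega) le_rfl
        rw [hfind]
        have hnpa : nidx par.length (par[s]'hvn) = (par[s]'hvn).toNat := nidx_nonneg _ _ h0pa
        -- the returned root equals Root par s
        have hreq : Root par (nidx par.length (par[s]'hvn)) = Root par s := by
          rw [hnpa]
          by_cases hfix : par[s]'hvn = (s : Int)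
          · have : (par[s]'hvn).toNat = s := by omega
            rw [this]
          · exact (Root_step par s hG hvn hfix).symm
        rw [hreq]
        set r : Int := (Root par s : Int) with hrdef
        have hrle : Root par s ≤ s := Root_le s par hG
        have hset := pySet?_valid p a r (by rw [hplen]; exact h1) (by rw [hplen]; exact h2)
        have hnidp : nidx p.length a = s := by rw [hplen]
        rw [hnidp] at hset
        simp only [hset]
        have hslen : (p.set s r).length = par.length := by simp [hplen]
        have hread2 := pyGet?_valid (p.set s r) a
          (by rw [hslen]; exact h1) (by rw [hslen]; exact h2)
        have hnids : nidx (p.set s r).length a = s := by rw [hslen]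
        simp only [hnids, List.getElem_set_self] at hread2
        simp only [hread2]
        have hGps : GoodP (p.set s r) := GoodP_set p s r hGp (by omega) (by omega)
        refine ⟨_, rfl, hslen, hGps, ?_⟩
        intro j hj
        -- Root p s = Root par s, so the write at s is a path-compression write in p
        have hRs : Root p s = Root par s := hRp s hvn
        have : Root (p.set s (Root p s : Int)) j = Root p j :=
          Root_set_own j p s hGp (by omega) (by omega)
        rw [hRs] at this
        rw [this]
        exact hRp j hj

lemma mu_lt_succ (par : List Int) (a : Int)
    (h1 : -(par.length : Int) ≤ a) (h2 : a < (par.length : Int)) :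
    mu par.length a < par.length + 1 := by
  have h := nidx_lt_of_valid par.length a h1 h2
  unfold mu; split <;> omega

-- the comp ↔ forest invariant: comp holds each slot's current root label
def CompInv (comp par : List Int) : Prop :=
  comp.length = par.length ∧ ∀ j : Nat, (h : j < comp.length) →
    comp[j] = (Root par j : Int)

lemma step_eq (n : Int) (ans : List String) (par comp : List Int) (c : List Int)
    (hG : GoodP par) (hlen : par.length = (n+1).toNat) (hc : calcOK n c = true)
    (hCI : CompInv comp par) :
    ∃ ans' par' comp', stepA (some (ans, par)) c = some (ans', par') ∧
      stepB (some (ans, comp)) c = some (ans', comp') ∧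
      GoodP par' ∧ par'.length = par.length ∧ CompInv comp' par' := by
  obtain ⟨hclen, hcomp⟩ := hCI
  match c, hc with
  | c0 :: c1 :: c2 :: rest, hc =>
    simp only [calcOK, decide_eq_true_eq] at hc
    obtain ⟨hb1, hb2, hb3, hb4⟩ := hc
    have hn0 : 0 ≤ n := by omega
    have hlenI : (par.length : Int) = n + 1 := by omega
    have hv1a : -(par.length : Int) ≤ c1 := by omega
    have hv1b : c1 < (par.length : Int) := by omega
    have hv2a' : -(par.length : Int) ≤ c2 := by omega
    have hv2b' : c2 < (par.length : Int) := by omega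
    have hg0 : PySem.List.pyGet? (c0 :: c1 :: c2 :: rest) 0 = some c0 :=
      PySem.List.pyGet?_zero_cons _ _
    have hg1 : PySem.List.pyGet? (c0 :: c1 :: c2 :: rest) 1 = some c1 := by
      rw [PySem.List.pyGet?, PySem.List.pyIdx?, if_pos (by omega : (0:Int) ≤ 1),
        if_pos (by simp; omega : (1:Int) < ((c0 :: c1 :: c2 :: rest).length : Int))]
      rfl
    have hg2 : PySem.List.pyGet? (c0 :: c1 :: c2 :: rest) 2 = some c2 := by
      rw [PySem.List.pyGet?, PySem.List.pyIdx?, if_pos (by omega : (0:Int) ≤ 2),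
        if_pos (by simp; omega : (2:Int) < ((c0 :: c1 :: c2 :: rest).length : Int))]
      rfl
    set s1 := nidx par.length c1 with hs1
    set s2 := nidx par.length c2 with hs2
    have hs1lt : s1 < par.length := nidx_lt_of_valid _ _ hv1a hv1b
    have hs2lt : s2 < par.length := nidx_lt_of_valid _ _ hv2a' hv2b'
    -- A's two finds
    have hmu1 := mu_lt_succ par c1 hv1a hv1b
    obtain ⟨p1, hf1, hp1len, hG1, hR1⟩ :=
      findA_root (mu par.length c1) (par.length+1) c1 par hG hv1a hv1b hmu1 le_rfl
    have hv2a : -(p1.length : Int) ≤ c2 := by rw [hp1len]; exact hv2a'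
    have hv2b : c2 < (p1.length : Int) := by rw [hp1len]; exact hv2b'
    have hmu2 := mu_lt_succ p1 c2 hv2a hv2b
    obtain ⟨p2, hf2, hp2len, hG2, hR2⟩ :=
      findA_root (mu p1.length c2) (p1.length+1) c2 p1 hG1 hv2a hv2b hmu2 le_rfl
    have hs2p1 : nidx p1.length c2 = s2 := by rw [hp1len]
    rw [hs2p1] at hf2
    have hRs2 : Root p1 s2 = Root par s2 := hR1 s2 hs2lt
    rw [hRs2] at hf2
    set na := Root par s1 with hna
    set nb := Root par s2 with hnb
    set ra : Int := (na : Int) with hra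
    set rb : Int := (nb : Int) with hrb
    have hp2par : p2.length = par.length := hp2len.trans hp1len
    have hRp2 : ∀ j : Nat, j < par.length → Root p2 j = Root par j := fun j hj =>
      (hR2 j (by omega)).trans (hR1 j hj)
    have hnalt : na < par.length := by have := Root_le s1 par hG; omega
    have hnblt : nb < par.length := by have := Root_le s2 par hG; omega
    -- na, nb are roots of p2
    have hroot_na : p2[na]? = some (na : Int) := by
      have h := Root_isRoot s1 p2 hG2 (by omega)
      rw [hRp2 s1 hs1lt] at h
      exact h.2
    have hroot_nb : p2[nb]? = some (nb : Int) := by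
      have h := Root_isRoot s2 p2 hG2 (by omega)
      rw [hRp2 s2 hs2lt] at h
      exact h.2
    -- B's reads
    have hnc1 : nidx comp.length c1 = s1 := by rw [hclen]
    have hnc2 : nidx comp.length c2 = s2 := by rw [hclen]
    have hcg1 : PySem.List.pyGet? comp c1 = some ra := by
      rw [pyGet?_valid comp c1 (by rw [hclen]; exact hv1a) (by rw [hclen]; exact hv1b)]
      simp only [hnc1]
      rw [hcomp s1 (by omega)]
    have hcg2 : PySem.List.pyGet? comp c2 = some rb := by
      rw [pyGet?_valid comp c2 (by rw [hclen]; exact hv2a') (by rw [hclen]; exact hv2b')]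
      simp only [hnc2]
      rw [hcomp s2 (by omega)]
    by_cases hc0 : c0 = 0
    · -- union
      simp only [stepA, stepB, hg0, hg1, hg2, hcg1, hcg2, if_pos hc0]
      simp only [unionA, hf1, hf2]
      by_cases hgt : ra > rb
      · have hne : ra ≠ rb := by omega
        rw [if_pos hgt, if_pos hne]
        have hset := pySet?_valid p2 ra rb (by omega) (by omega)
        rw [nidx_nonneg _ _ (by omega : (0:Int) ≤ ra)] at hset
        have hton : ra.toNat = na := by omega
        rw [hton] at hset
        simp only [hset, Option.map_some, if_pos hgt]
        refine ⟨ans, _, _, rfl, rfl,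
          GoodP_set p2 na rb hG2 (by omega) (by omega), by simp [hp2par], ?_, ?_⟩
        · simp [hclen, hp2par]
        · intro j hj
          have hjlt : j < par.length := by simp only [List.length_map] at hj; omega
          have hun := Root_set_union j p2 na nb hG2 (by omega) (by omega)
            hroot_na hroot_nb (by omega) (by omega)
          rw [hun]
          rw [List.getElem_map]
          rw [hcomp j (by simp only [List.length_map] at hj; omega), hRp2 j hjlt]
          by_cases hcase : Root par j = na
          · rw [if_pos hcase, if_pos (by rw [hcase])]
          · rw [if_neg hcase, if_neg (by intro h; rw [hra] at h; exact hcase (by exact_mod_cast h))]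
      · rw [if_neg hgt]
        have hset := pySet?_valid p2 rb ra (by omega) (by omega)
        rw [nidx_nonneg _ _ (by omega : (0:Int) ≤ rb)] at hset
        have hton : rb.toNat = nb := by omega
        rw [hton] at hset
        simp only [hset, Option.map_some]
        have hun : ∀ j : Nat, j < par.length →
            Root (p2.set nb ra) j = if Root par j = nb then na else Root par j := by
          intro j hj
          have := Root_set_union j p2 nb na hG2 (by omega) (by omega)
            hroot_nb hroot_na (by omega) (by omega)
          rw [this, hRp2 j hj]
        by_cases heq : ra = rb
        · rw [if_neg (not_ne_iff.mpr heq)]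
          refine ⟨ans, _, comp, rfl, rfl,
            GoodP_set p2 nb ra hG2 (by omega) (by omega), by simp [hp2par], ?_, ?_⟩
          · simp [hclen, hp2par]
          · intro j hj
            have hjlt : j < par.length := by omega
            rw [hun j hjlt, hcomp j hj]
            have hnanb : na = nb := by omega
            by_cases hcase : Root par j = nb
            · rw [if_pos hcase, hcase, hnanb]
            · rw [if_neg hcase]
        · rw [if_pos heq]
          simp only [if_neg hgt]
          refine ⟨ans, _, _, rfl, rfl,
            GoodP_set p2 nb ra hG2 (by omega) (by omega), by simp [hp2par], ?_, ?_⟩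
          · simp [hclen, hp2par]
          · intro j hj
            have hjlt : j < par.length := by simp only [List.length_map] at hj; omega
            rw [hun j hjlt]
            rw [List.getElem_map]
            rw [hcomp j (by simp only [List.length_map] at hj; omega)]
            by_cases hcase : Root par j = nb
            · rw [if_pos hcase, if_pos (by rw [hcase])]
            · rw [if_neg hcase, if_neg (by intro h; rw [hrb] at h; exact hcase (by exact_mod_cast h))]
    · -- query
      simp only [stepA, stepB, hg0, hg1, hg2, hcg1, hcg2, if_neg hc0]
      simp only [hf1, hf2]
      refine ⟨_, p2, comp, ?_, rfl, hG2, hp2par, ?_, ?_⟩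
      · by_cases hrr : ra = rb <;> simp [hrr]
      · rw [hclen, hp2par]
      · intro j hj
        have hjlt : j < par.length := by omega
        rw [hcomp j hj, hRp2 j hjlt]

lemma loop_eq : ∀ (cs : List (List Int)) (n : Int) (ans : List String) (par comp : List Int),
    GoodP par → par.length = (n+1).toNat → (∀ c ∈ cs, calcOK n c = true) →
    CompInv comp par →
    (cs.foldl stepA (some (ans, par))).map Prod.fst
      = (cs.foldl stepB (some (ans, comp))).map Prod.fst := by
  intro cs
  induction cs with
  | nil => intro _ _ _ _ _ _ _ _; rfl
  | cons c rest ih =>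
    intro n ans par comp hG hlen hcs hCI
    obtain ⟨ans', par', comp', hA, hB, hG', hlen', hCI'⟩ :=
      step_eq n ans par comp c hG hlen (hcs c (by simp)) hCI
    simp only [List.foldl_cons, hA, hB]
    exact ih n ans' par' comp' hG' (hlen'.trans hlen) (fun d hd => hcs d (by simp [hd])) hCI'

-- ===== VERDICT (by name: the statement is the Claim_ definition above) =====
theorem solution_spec : Claim_equal_solution := by
  intro n calculations _ hPre
  unfold Spec_solution solution solution_alt
  dsimp only
  rw [PySem.List.foldl_append_singleton, List.nil_append]
  have hG : GoodP (PySem.List.pyRange 0 (n+1) 1) := by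
    intro i h
    rw [PySem.List.getElem_pyRange_one]
    constructor <;> omega
  have hlen : (PySem.List.pyRange 0 (n+1) 1).length = (n+1).toNat := by
    rw [PySem.List.length_pyRange_one]; omega
  have hCI : CompInv (PySem.List.pyRange 0 (n+1) 1) (PySem.List.pyRange 0 (n+1) 1) := by
    refine ⟨rfl, ?_⟩
    intro j hj
    have hfix : (PySem.List.pyRange 0 (n+1) 1)[j]'(by omega) = (j : Int) := by
      rw [PySem.List.getElem_pyRange_one]; omega
    rw [Root_fix _ j hj hfix, hfix]
  rw [loop_eq calculations n [] _ _ hG hlen hPre hCI]
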